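-- pv_equiv track=rewrite | github.com/Sanjay-Gundeboina/batch37r_python | Problem solving _3 levels.py.py | weeklySalary
-- ===== SOURCE A (Python) =====
-- def weeklySalary(lst):
--    total_sal=0
--    days=0
--    for hrs in lst:
--        if days<5:
--            if hrs>8:
--                total_sal+= 8*10+(hrs-8)*15
--            else:
--                total_sal+=hrs*10
--        else:
--            if hrs>8:
--                 total_sal+=2*(8*10+(hrs-8)*15)
--
--            else:
--                 total_sal+=2*(hrs*10)
--        days+=1
--    return total_sal
-- ===== SOURCE B (Python) =====
-- def weeklySalary(lst):
--     # Aggregate formulation: pay of one day = 10*h + 5*overtime(h), weekend days count twice.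
--     S = sum(lst)
--     O = sum(h - 8 for h in lst if h > 8)
--     Sw = sum(lst[5:])
--     Ow = sum(h - 8 for h in lst[5:] if h > 8)
--     return 10 * (S + Sw) + 5 * (O + Ow)
-- ===== Notes on version B (the rewrite author's own statement) =====
-- stated objective: alternative
-- what changed: Drops the per-day branching pay computation and the days counter entirely: B computes four aggregate sums (all hours, all overtime hours beyond 8, and the same two over the weekend suffix lst[5:]) and returns the single closed linear combination 10*(S+Sw)+5*(O+Ow), since a day's pay is 10*h+5*max(h-8,0) and weekend days contribute one extra copy.
import Mathlib
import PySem

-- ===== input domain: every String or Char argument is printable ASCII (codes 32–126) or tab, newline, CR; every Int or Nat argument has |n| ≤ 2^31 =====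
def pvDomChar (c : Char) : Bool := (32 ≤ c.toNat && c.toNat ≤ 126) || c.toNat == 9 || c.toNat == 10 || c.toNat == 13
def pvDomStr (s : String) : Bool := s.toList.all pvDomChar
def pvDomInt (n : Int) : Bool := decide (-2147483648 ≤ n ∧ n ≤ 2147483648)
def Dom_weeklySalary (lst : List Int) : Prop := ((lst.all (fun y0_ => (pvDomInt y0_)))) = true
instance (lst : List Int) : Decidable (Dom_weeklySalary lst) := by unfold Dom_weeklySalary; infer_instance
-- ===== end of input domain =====

-- B replaces A's per-day branch-and-counter pass by four aggregate sums (all hours,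
-- overtime hours, both again over the weekend suffix lst[5:]) combined in one closed
-- linear formula 10*(S+Sw)+5*(O+Ow) (objective: alternative).


-- ===== PORT A =====
def weeklySalary (lst : List Int) : Int :=
  (lst.foldl (fun (st : Int × Int) hrs =>
      let total_sal := st.1
      let days := st.2
      let total_sal :=
        if days < 5 then
          if hrs > 8 then total_sal + (8 * 10 + (hrs - 8) * 15)
          else total_sal + hrs * 10
        else
          if hrs > 8 then total_sal + 2 * (8 * 10 + (hrs - 8) * 15)
          else total_sal + 2 * (hrs * 10)
      (total_sal, days + 1)) (0, 0)).1

-- ===== PORT B =====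
-- lst[5:] = drop 5 (exact for a non-negative literal slice bound);
-- sum(h-8 for h in xs if h>8) = ((xs.filter (· > 8)).map (· - 8)).sum
def weeklySalary_alt (lst : List Int) : Int :=
  let S := lst.sum
  let O := ((lst.filter (fun h => h > 8)).map (fun h => h - 8)).sum
  let Sw := (lst.drop 5).sum
  let Ow := (((lst.drop 5).filter (fun h => h > 8)).map (fun h => h - 8)).sum
  10 * (S + Sw) + 5 * (O + Ow)

-- ===== PRECONDITION & SPEC =====
def Spec_weeklySalary (lst : List Int) (out : Int) : Prop := out = weeklySalary_alt lst
instance (lst : List Int) (out : Int) : Decidable (Spec_weeklySalary lst out) := by unfold Spec_weeklySalary; infer_instance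

-- ===== CLAIM =====
def Claim_equal_weeklySalary : Prop := ∀ (lst : List Int), Dom_weeklySalary lst → Spec_weeklySalary lst (weeklySalary lst)

-- ===== LEMMAS AND PROOFS =====
-- A's branch value for one day
def pvPayA (h : Int) : Int := if h > 8 then 8 * 10 + (h - 8) * 15 else h * 10

-- the aggregate 10*sum + 5*overtime-sum equals the per-day branch sum
theorem pvAgg_eq (xs : List Int) :
    10 * xs.sum + 5 * ((xs.filter (fun h => h > 8)).map (fun h => h - 8)).sum
      = (xs.map pvPayA).sum := by
  induction xs with
  | nil => simp
  | cons h t ih =>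
    by_cases hc : h > 8
    · rw [List.filter_cons_of_pos (by simpa using hc)]
      simp only [List.map_cons, List.sum_cons, pvPayA, if_pos hc]
      rw [← ih]; ring
    · rw [List.filter_cons_of_neg (by simpa using hc)]
      simp only [List.map_cons, List.sum_cons, pvPayA, if_neg hc]
      rw [← ih]; ring

theorem weeklySalary_loop (lst : List Int) :
    ∀ (total : Int) (d : Nat),
      (lst.foldl (fun (st : Int × Int) hrs =>
        let total_sal := st.1
        let days := st.2
        let total_sal :=
          if days < 5 then
            if hrs > 8 then total_sal + (8 * 10 + (hrs - 8) * 15)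
            else total_sal + hrs * 10
          else
            if hrs > 8 then total_sal + 2 * (8 * 10 + (hrs - 8) * 15)
            else total_sal + 2 * (hrs * 10)
        (total_sal, days + 1)) (total, (d : Int))).1
      = total + ((lst.take (5 - d)).map pvPayA).sum + 2 * ((lst.drop (5 - d)).map pvPayA).sum := by
  induction lst with
  | nil => intro total d; simp
  | cons h t ih =>
    intro total d
    have hcast : ((d : Int) + 1) = ((d + 1 : Nat) : Int) := by push_cast; ring
    by_cases hd : d < 5
    · have h5 : 5 - d = (5 - (d + 1)) + 1 := by omega
      have hlt : (d : Int) < 5 := by exact_mod_cast hd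
      simp only [List.foldl_cons, if_pos hlt, hcast]
      rw [ih, h5]
      simp only [List.take_succ_cons, List.drop_succ_cons, List.map_cons, List.sum_cons, pvPayA]
      split_ifs <;> ring
    · have h5 : 5 - d = 0 := by omega
      have h5' : 5 - (d + 1) = 0 := by omega
      have hlt : ¬ ((d : Int) < 5) := by exact_mod_cast hd
      simp only [List.foldl_cons, if_neg hlt, hcast]
      rw [ih, h5, h5']
      simp only [List.take_zero, List.drop_zero, List.map_cons, List.sum_cons, List.map_nil,
        List.sum_nil, pvPayA]
      split_ifs <;> ring

-- ===== VERDICT =====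
theorem weeklySalary_spec : Claim_equal_weeklySalary := by
  intro lst _
  show weeklySalary lst = weeklySalary_alt lst
  unfold weeklySalary
  have hloop := weeklySalary_loop lst 0 0
  simp only [Nat.cast_zero, Nat.sub_zero, zero_add] at hloop
  rw [hloop]
  show _ = 10 * (lst.sum + (lst.drop 5).sum)
        + 5 * (((lst.filter (fun h => h > 8)).map (fun h => h - 8)).sum
             + (((lst.drop 5).filter (fun h => h > 8)).map (fun h => h - 8)).sum)
  rw [show lst.sum = (lst.take 5).sum + (lst.drop 5).sum by
        rw [← List.sum_append, List.take_append_drop],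
      show (lst.filter (fun h => h > 8)) = (lst.take 5).filter (fun h => h > 8)
            ++ (lst.drop 5).filter (fun h => h > 8) by
        rw [← List.filter_append, List.take_append_drop]]
  simp only [List.map_append, List.sum_append]
  rw [← pvAgg_eq (lst.take 5), ← pvAgg_eq (lst.drop 5)]
  ring
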